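/- GENERATED by tools/from_farm_form.py from prooffarm-gif/accepted/DGifGetWord.P/Proof.lean (a worked proof of the farm's unit `DGifGetWord.P`,
   accepted by the verdict) — do not edit. -/
import Gif.Spec.Units.DGifGetWord_P
import Gif.Spec.AllSegs

open X86 X86.User Asan ProgX.Base ProgX.Base.Spec Gif.Spec

set_option maxRecDepth 4000
set_option maxHeartbeats 4000000

/-!
  `DGifGetWord.P` (0x106020 … 0x106063, 13 instructions; dgif_lib.c:740): THE PROLOGUE OF A PROTECTED FUNCTION, the worked example
  of the fifteen prologue units. The lemmas are those of Gif/Spec/FrameCarry.lean (§1 – §3; its header has this recipe), the traps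
  are in farm.gif/hints/protected_frame.md. The blocks below:
    1. the prelude and the walk to the cut behind the last inline shadow store;
    2. `name_stores2`: the memory before the shadow stores gets the name `M0`, `hmem : s.mem = storesMem M0 (base / 8) F.prologue`;
    3. about `M0` (a nest of STACK stores over `e.mem`): the footprint `hsame0`, the saved registers' slots;
    4. `after_prologue` (`HeapInv` with the own frame pushed, `GifOK`, `rem`), `prologue_same` (the two footprints);
    5. the exit assertion `Start`, field by field.
-/

/-- The prologue of `DGifGetWord` establishes `Start` at 0x106063. -/
theorem Gif.Spec.Proved.DGifGetWord_P_ok : Gif.Spec.DGifGetWord_P.Statement := by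
  intro Lay hLay μ hμ u₀ hcode H rest frames F R e ret he hpre
  -- 1. THE PRELUDE: the entry's facts (`he_align`, `he_room`, `he_top`, `he_retAddr`, `he_df`, `he_mx` …), the precondition
  have he0 := he
  v_entry he
  obtain ⟨henv, hrdi, hword⟩ := hpre
  -- THE WALK, to the cut behind the last inline shadow store
  u_walk hcode [hμ.vendor] until [Gif.L.DGifGetWord.at_106063] span [ProgX.Base.L.textLo, ProgX.Base.L.textHi] side (v_side)
  -- 2. NAMING THE MEMORY before the two shadow stores: the arguments are the index register's source (`rsp` at the `mov rbx, rsp`),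
  -- then per store the displacement as the walker prints it (decimal), its granule offset, its width, its value (decimal)
  have e88 : (e.reg .rsp - 88).toNat = (e.reg .rsp).toNat - 88 := by u_omega
  obtain ⟨M0, hM0, hmem⟩ := name_stores2 (e.reg .rsp - 88) 12582912 12582916 0 4 4059165169 4 4 4092850946
    w_mem (by omega) (by decide) (by decide) (by decide) (by decide)
  have hpro : Gif.Frames.DGifGetWord.prologue = [⟨0, 4, 4059165169⟩, ⟨4, 4, 4092850946⟩] := rfl
  rw [← hpro, e88] at hmem
  -- 3. ABOUT `M0`: only stack stores over `e.mem` (three pushes, the frame's three header words)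
  have hsame0 : Mem.SameExcept [⟨(e.reg .rsp).toNat - 272, (e.reg .rsp).toNat⟩] e.mem M0 := by
    rw [hM0]
    u_same
  have k_r12 : M0.readLE (e.reg .rsp - 8) 8 = (e.reg .r12).toNat := by
    rw [hM0]
    u_read
  have k_rbp : M0.readLE (e.reg .rsp - 16) 8 = (e.reg .rbp).toNat := by
    rw [hM0]
    u_read
  have k_rbx : M0.readLE (e.reg .rsp - 24) 8 = (e.reg .rbx).toNat := by
    rw [hM0]
    u_read
  clear hM0 w_mem
  -- 4. THE ENVIRONMENT behind the prologue: the heap's invariant with the own frame pushed, the state invariant, the reader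
  obtain ⟨hinv1, hok1, hrem1⟩ := after_prologue (top := (e.reg .rsp).toNat) (top' := (e.reg .rsp).toNat - 88) (ro := 88)
    (Fl := Gif.Frames.DGifGetWord) henv.heap.inv henv.ctx henv.ok Gif.Frames.DGifGetWord_ok rfl he_align hsame0
    (by omega) (Nat.le_refl _) (by omega) (by omega)
  -- the prologue's own footprint (`Start.same0`), and the same in front of the contract's windows (`Body.same`)
  have hsame1 := prologue_same (top := (e.reg .rsp).toNat) (Fl := Gif.Frames.DGifGetWord) Gif.Frames.DGifGetWord_ok
    (ro := 88) (ro' := 24) rfl rfl he_align (by omega) (by omega) hsame0 []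
  have hsame2 := prologue_same (top := (e.reg .rsp).toNat) (Fl := Gif.Frames.DGifGetWord) Gif.Frames.DGifGetWord_ok
    (ro := 88) (ro' := 24) rfl rfl he_align (by omega) (by omega) hsame0
    [⟨(e.reg .rsi).toNat, (e.reg .rsi).toNat + 4⟩, ⟨F.gif + 96, F.gif + 100⟩, ⟨R.cur, R.cur + 8⟩]
  have hin : ∀ s, s ∈ Gif.Frames.DGifGetWord.prologue → s.idx + s.width ≤ 8 := by decide
  rw [← hmem] at hinv1 hok1 hrem1 hsame1 hsame2
  -- 5. THE EXIT ASSERTION: `Body` at 0x106063 …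
  have hbody : DGifGetWord.Body Gif.L.DGifGetWord.at_106063 H rest frames F R u₀ e ret s_106059 := {
    entry := he0
    pre := ⟨henv, hrdi, hword⟩
    rip := w_rip
    rsp := w_rsp
    rbx := w_rbx
    r13 := w_kept.get .r13 rfl
    r14 := w_kept.get .r14 rfl
    r15 := w_kept.get .r15 rfl
    -- a slot is read THROUGH the shadow stores (`readLE_storesMem`), then in `M0`
    slot_r12 := by
      rw [hmem, readLE_storesMem M0 _ 8 _ hin (by omega) _ _ (by u_omega)]
      exact k_r12
    slot_rbp := by
      rw [hmem, readLE_storesMem M0 _ 8 _ hin (by omega) _ _ (by u_omega)]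
      exact k_rbp
    slot_rbx := by
      rw [hmem, readLE_storesMem M0 _ 8 _ hin (by omega) _ _ (by u_omega)]
      exact k_rbx
    -- the return address: the prologue's footprint ends below its slot
    slot_ra := by
      rw [prologue_same_readLE hsame1 (e.reg .rsp) 8 (Nat.le_refl _) (by omega)]
      exact he_retAddr
    inv := hinv1
    ok := hok1
    rem := Nat.le_of_eq hrem1
    same := hsame2
    code := ProgX.Base.conv_code_in w_eq
    -- DF and MXCSR by hand (`v_inv` is slow behind a walk with shadow stores)
    abi := by
      refine ProgX.Base.abiInv_of ?_ ?_
      · rw [w_flags]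
        simp only [X86.User.df_setStatus]
        exact he_df
      · rw [w_mxcsr]
        exact he_mx
  }
  -- … and what only the first body segment may use: where the arguments are, the prologue's own footprint
  refine ReachVia.done ?_
  exact {
    body := hbody
    rbp := w_rbp
    r12 := w_r12
    rdi := w_kept.get .rdi rfl
    same0 := hsame1
  }
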